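-- pv_equiv track=rewrite | github.com/SACGF/variantgrid | genes/management/commands/import_gene_annotation2.py | _get_most_recent_transcripts
-- ===== SOURCE A (Python) =====
-- from typing import Dict, List, Set, Iterable
--
-- def _get_most_recent_transcripts(pyreference_data) -> List[Set]:
--     transcripts_in_files = [set(prd["transcripts_by_id"]) for prd in pyreference_data]
--     most_recent_transcripts = []
--     all_transcripts = set()
--     for tif in reversed(transcripts_in_files):
--         unique_transcripts = tif - all_transcripts
--         most_recent_transcripts.append(unique_transcripts)
--         all_transcripts |= unique_transcripts
--     most_recent_transcripts.reverse()
--     return most_recent_transcripts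
-- ===== SOURCE B (Python) =====
-- def _get_most_recent_transcripts(pyreference_data):
--     most_recent = {}
--     for i, prd in enumerate(pyreference_data):
--         for transcript_id in prd["transcripts_by_id"]:
--             most_recent[transcript_id] = i
--     return [{t for t in prd["transcripts_by_id"] if most_recent[t] == i}
--             for i, prd in enumerate(pyreference_data)]
-- ===== Notes on version B (the rewrite author's own statement) =====
-- stated objective: alternative
-- what changed: Replaces A's reverse iteration with accumulating set differences and unions by two forward passes: a dict mapping each transcript to its last (most recent) file index, then a per-file filter keeping the transcripts whose last index is that file.
import Mathlib
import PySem

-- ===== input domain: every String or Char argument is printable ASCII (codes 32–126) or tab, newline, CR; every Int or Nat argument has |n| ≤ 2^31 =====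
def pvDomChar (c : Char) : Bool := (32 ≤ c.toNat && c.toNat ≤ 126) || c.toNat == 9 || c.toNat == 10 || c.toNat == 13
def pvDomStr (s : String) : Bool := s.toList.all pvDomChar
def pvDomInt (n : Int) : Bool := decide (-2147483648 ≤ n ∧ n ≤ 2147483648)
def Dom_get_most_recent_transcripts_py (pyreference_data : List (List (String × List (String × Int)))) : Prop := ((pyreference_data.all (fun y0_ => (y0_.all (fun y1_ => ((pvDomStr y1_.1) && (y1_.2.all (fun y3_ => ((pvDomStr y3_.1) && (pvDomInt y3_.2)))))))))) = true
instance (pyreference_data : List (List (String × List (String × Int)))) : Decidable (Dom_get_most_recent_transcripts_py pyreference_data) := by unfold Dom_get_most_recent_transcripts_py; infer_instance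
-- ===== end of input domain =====

-- B replaces A's reverse pass with accumulated set differences/unions by a forward last-occurrence
-- index (a dict) plus a per-file filter; objective: alternative decomposition, same asymptotic cost.

-- ===== PORT A =====
-- set(prd["transcripts_by_id"]) : the distinct keys of the inner dict, first occurrences in order;
-- the [] lookup raises KeyError when the key is missing — excluded by Pre_ (getD [] is never reached inside Pre_).
def aKeys (prd : List (String × List (String × Int))) : List String :=
  PySem.Set.ofList ((((PySem.Dict.mk prd).get? "transcripts_by_id").getD []).map Prod.fst)

-- the body of A's 'for tif in reversed(transcripts_in_files)' loop
def stepA (st : List (List String) × PySem.Set String) (tif : List String) :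
    List (List String) × PySem.Set String :=
  let unique_transcripts := PySem.Set.diff tif st.2
  (st.1 ++ [unique_transcripts], PySem.Set.union st.2 unique_transcripts)

def get_most_recent_transcripts_py (pyreference_data : List (List (String × List (String × Int)))) : List (List String) :=
  let transcripts_in_files : List (List String) := pyreference_data.map aKeys
  let st := transcripts_in_files.reverse.foldl stepA ([], PySem.Set.empty)
  st.1.reverse

-- ===== PORT B =====
-- iterating prd["transcripts_by_id"] iterates the inner dict's (distinct) keys; KeyError excluded by Pre_.
def bKeys (prd : List (String × List (String × Int))) : List String :=
  PySem.Set.ofList ((((PySem.Dict.mk prd).get? "transcripts_by_id").getD []).map Prod.fst)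

-- the body of B's first loop: 'for t in prd["transcripts_by_id"]: most_recent[t] = i'
def stepB (d : PySem.Dict String Int) (p : Int × List (String × List (String × Int))) :
    PySem.Dict String Int :=
  (bKeys p.2).foldl (fun d t => d.insert t p.1) d

def get_most_recent_transcripts_py_alt (pyreference_data : List (List (String × List (String × Int)))) : List (List String) :=
  let most_recent : PySem.Dict String Int :=
    (PySem.List.enumerate pyreference_data 0).foldl stepB PySem.Dict.empty
  (PySem.List.enumerate pyreference_data 0).map
    (fun p => PySem.Set.ofList
      ((bKeys p.2).filter (fun t => most_recent.get? t == some p.1)))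

-- ===== PRECONDITION & SPEC =====
-- Pre_ excludes exactly the inputs where A raises KeyError: some file dict lacks the "transcripts_by_id" key.
def Pre_get_most_recent_transcripts_py (pyreference_data : List (List (String × List (String × Int)))) : Prop :=
  ∀ prd ∈ pyreference_data, (PySem.Dict.mk prd).contains "transcripts_by_id" = true

instance (pyreference_data : List (List (String × List (String × Int)))) : Decidable (Pre_get_most_recent_transcripts_py pyreference_data) := by unfold Pre_get_most_recent_transcripts_py; infer_instance

def pvWitness_get_most_recent_transcripts_py : (List (List (String × List (String × Int)))) :=
  [[("transcripts_by_id", [("t1", 1), ("t2", 2)])], [("transcripts_by_id", [("t2", 3)])]]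

def Spec_get_most_recent_transcripts_py (pyreference_data : List (List (String × List (String × Int)))) (out : List (List String)) : Prop := out = get_most_recent_transcripts_py_alt pyreference_data
instance (pyreference_data : List (List (String × List (String × Int)))) (out : List (List String)) : Decidable (Spec_get_most_recent_transcripts_py pyreference_data out) := by unfold Spec_get_most_recent_transcripts_py; infer_instance

-- ===== CLAIM (what is proved, stated in full; the proofs are below) =====
def Claim_equal_get_most_recent_transcripts_py : Prop := ∀ (pyreference_data : List (List (String × List (String × Int)))), Dom_get_most_recent_transcripts_py pyreference_data → Pre_get_most_recent_transcripts_py pyreference_data → Spec_get_most_recent_transcripts_py pyreference_data (get_most_recent_transcripts_py pyreference_data)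

-- ===== LEMMAS AND PROOFS =====

-- common reference function: entry i keeps the keys of file i that satisfy neither the extra
-- predicate p nor occur in any later file
def specG (ks : List (List String)) (p : String → Bool) : List (List String) :=
  match ks with
  | [] => []
  | k :: rest => k.filter (fun t => !(p t) && !(rest.flatten.contains t)) :: specG rest p

theorem specG_congr (ks : List (List String)) (p q : String → Bool)
    (h : ∀ t, p t = q t) : specG ks p = specG ks q := by
  induction ks with
  | nil => rfl
  | cons k rest ih => simp [specG, ih, h]

theorem specG_append (ks : List (List String)) (k : List String) (p : String → Bool) :
    specG (ks ++ [k]) p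
      = specG ks (fun t => p t || k.contains t) ++ [k.filter (fun t => !(p t))] := by
  induction ks with
  | nil => simp [specG]
  | cons k0 rest ih =>
    simp only [List.cons_append, specG, ih, List.flatten_append, List.flatten_cons,
      List.flatten_nil, List.append_nil, List.cons_append]
    congr 1
    apply List.filter_congr
    intro t _
    simp only [List.contains_append, Bool.not_or]
    cases p t <;> cases k.contains t <;> cases (rest.flatten).contains t <;> simp

-- ---------- A side ----------
theorem stepA_fst_out (rs : List (List String)) (out : List (List String)) (all : PySem.Set String) :
    (rs.foldl stepA (out, all)).1 = out ++ (rs.foldl stepA ([], all)).1 := by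
  induction rs generalizing out all with
  | nil => simp
  | cons tif rs ih =>
    simp only [List.foldl_cons, stepA]
    rw [ih, ih ([] ++ _)]
    simp

def gA (rs : List (List String)) (all : PySem.Set String) : List (List String) :=
  match rs with
  | [] => []
  | tif :: rs =>
    PySem.Set.diff tif all :: gA rs (PySem.Set.union all (PySem.Set.diff tif all))

theorem foldA_eq_gA (rs : List (List String)) (all : PySem.Set String) :
    (rs.foldl stepA ([], all)).1 = gA rs all := by
  induction rs generalizing all with
  | nil => rfl
  | cons tif rs ih =>
    simp only [List.foldl_cons, stepA, gA]
    rw [stepA_fst_out, ih]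
    simp

theorem contains_union_all (all k : PySem.Set String) (t : String) :
    PySem.Set.contains (PySem.Set.union all (PySem.Set.diff k all)) t
      = (PySem.Set.contains all t || k.contains t) := by
  by_cases h1 : t ∈ all <;> by_cases h2 : t ∈ k <;>
    simp [PySem.Set.contains, PySem.Set.mem_union, PySem.Set.mem_diff, h1, h2]

theorem gA_reverse_eq_specG (ks : List (List String)) (all : PySem.Set String) :
    (gA ks.reverse all).reverse = specG ks (fun t => PySem.Set.contains all t) := by
  induction ks using List.reverseRecOn generalizing all with
  | nil => rfl
  | append_singleton ys k ih =>
    rw [List.reverse_append]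
    simp only [List.reverse_cons, List.reverse_nil, List.nil_append, List.singleton_append, gA,
      List.reverse_cons]
    rw [ih, specG_append]
    congr 1
    exact specG_congr _ _ _ (contains_union_all all k)

-- ---------- B side ----------
theorem get?_foldl_insert_const (l : List String) (d : PySem.Dict String Int) (v : Int)
    (t : String) :
    (l.foldl (fun d t => d.insert t v) d).get? t = if t ∈ l then some v else d.get? t := by
  induction l generalizing d with
  | nil => simp
  | cons a l ih =>
    simp only [List.foldl_cons, ih, List.mem_cons]
    by_cases h1 : t ∈ l
    · simp [h1]
    · by_cases h2 : t = a <;> simp [h1, h2, PySem.Dict.get?_insert]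

def mrD (data : List (List (String × List (String × Int)))) : PySem.Dict String Int :=
  (PySem.List.enumerate data 0).foldl stepB PySem.Dict.empty

theorem get?_mrD_append (data : List (List (String × List (String × Int))))
    (x : List (String × List (String × Int))) (t : String) :
    (mrD (data ++ [x])).get? t
      = if t ∈ bKeys x then some ((data.length : Int)) else (mrD data).get? t := by
  unfold mrD
  rw [PySem.List.enumerate_append, List.foldl_append]
  simp only [zero_add]
  exact get?_foldl_insert_const _ _ _ t

theorem fst_lt_of_mem_enumerate (data : List (List (String × List (String × Int))))
    (p : Int × List (String × List (String × Int))) (hp : p ∈ PySem.List.enumerate data 0) :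
    p.1 < (data.length : Int) := by
  rw [PySem.List.mem_enumerate_iff] at hp
  obtain ⟨k, hk, rfl⟩ := hp
  simp
  exact_mod_cast hk

theorem B_map_eq_specG (data : List (List (String × List (String × Int))))
    (extra : String → Bool) :
    (PySem.List.enumerate data 0).map
        (fun p => PySem.Set.ofList
          ((bKeys p.2).filter (fun t => !(extra t) && ((mrD data).get? t == some p.1))))
      = specG (data.map bKeys) extra := by
  induction data using List.reverseRecOn generalizing extra with
  | nil => rfl
  | append_singleton ys x ih =>
    rw [PySem.List.enumerate_append, List.map_append]
    simp only [List.map_append, List.map_cons, List.map_nil]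
    rw [specG_append]
    congr 1
    · -- prefix entries: fold the "t occurs in the last file" test into extra
      rw [← ih (fun t => extra t || (bKeys x).contains t)]
      apply List.map_congr_left
      intro p hp
      have hlt : p.1 < (ys.length : Int) := fst_lt_of_mem_enumerate ys p hp
      congr 1
      apply List.filter_congr
      intro t _
      rw [get?_mrD_append]
      by_cases h : t ∈ bKeys x
      · have : ¬ ((ys.length : Int) = p.1) := by omega
        simp [h, this]
      · simp [h]
    · -- the last file: every one of its keys was last written with index ys.length
      simp only [zero_add, PySem.List.enumerate_cons, PySem.List.enumerate_nil,
        List.map_cons, List.map_nil]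
      have hfil : (bKeys x).filter
            (fun t => !(extra t) && ((mrD (ys ++ [x])).get? t == some ((ys.length : Int))))
          = (bKeys x).filter (fun t => !(extra t)) := by
        apply List.filter_congr
        intro t ht
        rw [get?_mrD_append]
        simp [ht]
      rw [hfil, PySem.Set.ofList_eq_self_of_nodup]
      exact List.Nodup.filter _ (PySem.Set.nodup_ofList _)

-- ---------- assembling ----------
theorem A_eq_specG (data : List (List (String × List (String × Int)))) :
    get_most_recent_transcripts_py data = specG (data.map aKeys) (fun _ => false) := by
  show ((data.map aKeys).reverse.foldl stepA ([], PySem.Set.empty)).1.reverse = _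
  rw [foldA_eq_gA, gA_reverse_eq_specG]
  exact specG_congr _ _ _ (fun t => by simp [PySem.Set.contains, PySem.Set.empty])

theorem B_eq_specG (data : List (List (String × List (String × Int)))) :
    get_most_recent_transcripts_py_alt data = specG (data.map bKeys) (fun _ => false) := by
  have h := B_map_eq_specG data (fun _ => false)
  simp only [Bool.not_false, Bool.true_and] at h
  exact h

theorem aKeys_eq_bKeys : aKeys = bKeys := rfl

-- ===== VERDICT (by name: the statement is the Claim_ definition above) =====
theorem get_most_recent_transcripts_py_spec : Claim_equal_get_most_recent_transcripts_py := by
  intro data _ _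
  unfold Spec_get_most_recent_transcripts_py
  rw [A_eq_specG, B_eq_specG, aKeys_eq_bKeys]
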